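-- pv_equiv track=rewrite | github.com/tofan0412/Algorithm | 01. 개념 및 예제 문제/Implementation_Example/220317_BOJ_16935_배열돌리기3.py | rotate_quadrant_left
-- ===== SOURCE A (Python) =====
-- def rotate_quadrant_left(b):
--     points = read_quadrant(b)
--     total = []
--     n = len(b)
--     m = len(b[0])
--
--     for p in points:
--         std_r = p[0]
--         std_c = p[1]
--         tmp = []
--         for row in range(n // 2):
--             line = []
--             for col in range(m // 2):
--                 line.append(b[std_r + row][std_c + col])
--             tmp.append(line)
--         total.append(tmp)
--     tmp = list()
--     tmp.append(total[1])
--     tmp.append(total[3])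
--     tmp.append(total[0])
--     tmp.append(total[2])
--
--     result = list()
--     for i in range(n // 2):
--         # 4 사분면과 1 사분면을 합치고
--         line1 = tmp[0][i] + tmp[1][i]
--         result.append(line1)
--     for i in range(n // 2):
--         line1 = tmp[2][i] + tmp[3][i]
--         result.append(line1)
--     return result
--
-- def read_quadrant(b):
--     n = len(b)
--     m = len(b[0])
--     p1 = (0, 0)
--     p2 = (0, m // 2)
--     p3 = (n // 2, 0)
--     p4 = (n // 2, m // 2)
--
--     return p1, p2, p3, p4
-- ===== SOURCE B (Python) =====
-- def rotate_quadrant_left(b):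
--     hn = len(b) // 2
--     hm = len(b[0]) // 2
--     return [b[i][hm:2 * hm] + b[hn + i][hm:2 * hm] for i in range(hn)] + \
--            [b[i][:hm] + b[hn + i][:hm] for i in range(hn)]
-- ===== Notes on version B (the rewrite author's own statement) =====
-- stated objective: simpler
-- what changed: Replaces extract-four-quadrant-blocks-then-permute-then-reconcatenate (four nested copy loops plus an index permutation table) with direct construction of the output rows by slicing: row i is the right half of rows i and hn+i, then the left half of rows i and hn+i.
import Mathlib
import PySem

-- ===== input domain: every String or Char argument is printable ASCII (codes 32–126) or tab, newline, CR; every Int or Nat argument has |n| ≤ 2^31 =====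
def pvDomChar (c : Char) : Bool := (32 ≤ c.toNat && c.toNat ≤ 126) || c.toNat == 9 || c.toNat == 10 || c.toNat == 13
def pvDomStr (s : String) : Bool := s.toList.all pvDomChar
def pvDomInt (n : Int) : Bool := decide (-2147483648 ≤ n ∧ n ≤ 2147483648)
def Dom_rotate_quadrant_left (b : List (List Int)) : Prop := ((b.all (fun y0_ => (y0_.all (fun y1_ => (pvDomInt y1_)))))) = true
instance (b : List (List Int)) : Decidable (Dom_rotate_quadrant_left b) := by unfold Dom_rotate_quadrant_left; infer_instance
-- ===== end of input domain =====

-- B builds the output rows directly by slicing the input rows instead of extracting the four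
-- quadrant blocks, permuting them and re-concatenating (objective: simpler).

-- ===== PORT A =====
def read_quadrant (b : List (List Int)) : List (Int × Int) :=
  let n := PySem.List.len b
  let m := PySem.List.len (PySem.List.pyGetD b 0 [])
  [(0, 0), (0, PySem.Int.floordiv m 2), (PySem.Int.floordiv n 2, 0),
   (PySem.Int.floordiv n 2, PySem.Int.floordiv m 2)]

def rotate_quadrant_left (b : List (List Int)) : List (List Int) :=
  let points := read_quadrant b
  let n := PySem.List.len b
  let m := PySem.List.len (PySem.List.pyGetD b 0 [])
  let total := points.foldl (fun total p =>
    let std_r := p.1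
    let std_c := p.2
    let tmp := (PySem.List.pyRange 0 (PySem.Int.floordiv n 2) 1).foldl (fun tmp row =>
      let line := (PySem.List.pyRange 0 (PySem.Int.floordiv m 2) 1).foldl (fun line col =>
        line ++ [PySem.List.pyGetD (PySem.List.pyGetD b (std_r + row) []) (std_c + col) 0])
        ([] : List Int)
      tmp ++ [line]) ([] : List (List Int))
    total ++ [tmp]) ([] : List (List (List Int)))
  let tmp := [PySem.List.pyGetD total 1 [], PySem.List.pyGetD total 3 [],
              PySem.List.pyGetD total 0 [], PySem.List.pyGetD total 2 []]
  let result := (PySem.List.pyRange 0 (PySem.Int.floordiv n 2) 1).foldl (fun result i =>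
    result ++ [PySem.List.pyGetD (PySem.List.pyGetD tmp 0 []) i [] ++
               PySem.List.pyGetD (PySem.List.pyGetD tmp 1 []) i []]) ([] : List (List Int))
  (PySem.List.pyRange 0 (PySem.Int.floordiv n 2) 1).foldl (fun result i =>
    result ++ [PySem.List.pyGetD (PySem.List.pyGetD tmp 2 []) i [] ++
               PySem.List.pyGetD (PySem.List.pyGetD tmp 3 []) i []]) result

-- ===== PORT B =====
def rotate_quadrant_left_alt (b : List (List Int)) : List (List Int) :=
  let hn : Nat := b.length / 2
  let hm : Nat := (b.getD 0 []).length / 2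
  ((List.range hn).map (fun i =>
      PySem.List.slice (b.getD i []) (some (hm : Int)) (some ((2 * hm : Nat) : Int)) ++
      PySem.List.slice (b.getD (hn + i) []) (some (hm : Int)) (some ((2 * hm : Nat) : Int)))) ++
  ((List.range hn).map (fun i =>
      PySem.List.slice (b.getD i []) none (some (hm : Int)) ++
      PySem.List.slice (b.getD (hn + i) []) none (some (hm : Int))))

-- ===== PRECONDITION & SPEC =====
-- Pre_ excludes exactly the inputs where A raises IndexError: the empty list (b[0]), and
-- ragged inputs where an accessed row (index < 2*(len(b)//2)) is shorter than 2*(len(b[0])//2).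
def Pre_rotate_quadrant_left (b : List (List Int)) : Prop :=
  b ≠ [] ∧ ∀ r ∈ b.take (2 * (b.length / 2)), 2 * ((b.getD 0 []).length / 2) ≤ r.length
instance (b : List (List Int)) : Decidable (Pre_rotate_quadrant_left b) := by
  unfold Pre_rotate_quadrant_left; infer_instance

def pvWitness_rotate_quadrant_left : List (List Int) := [[1, 2], [3, 4]]

def Spec_rotate_quadrant_left (b : List (List Int)) (out : List (List Int)) : Prop :=
  out = rotate_quadrant_left_alt b
instance (b : List (List Int)) (out : List (List Int)) : Decidable (Spec_rotate_quadrant_left b out) := by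
  unfold Spec_rotate_quadrant_left; infer_instance

-- ===== CLAIM (what is proved, stated in full; the proofs are below) =====
def Claim_equal_rotate_quadrant_left : Prop :=
  ∀ (b : List (List Int)), Dom_rotate_quadrant_left b → Pre_rotate_quadrant_left b →
    Spec_rotate_quadrant_left b (rotate_quadrant_left b)

-- ===== LEMMAS AND PROOFS =====

theorem map_range_getD_take {r : List Int} {hm : Nat} (h : hm ≤ r.length) :
    (List.range hm).map (fun col => r.getD col 0) = r.take hm := by
  apply List.ext_getElem
  · simp [h]
  · intro i h1 h2
    have hi : i < hm := by simpa using h1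
    have hir : i < r.length := by omega
    simp [List.getElem?_eq_getElem hir]

theorem map_range_getD_drop {r : List Int} {hm : Nat} (h : 2 * hm ≤ r.length) :
    (List.range hm).map (fun col => r.getD (hm + col) 0) = (r.drop hm).take hm := by
  apply List.ext_getElem
  · simp; omega
  · intro i h1 h2
    have hi : i < hm := by simpa using h1
    have hir : hm + i < r.length := by omega
    simp [List.getElem?_eq_getElem hir]

-- ===== VERDICT (by name: the statement is the Claim_ definition above) =====
theorem rotate_quadrant_left_spec : Claim_equal_rotate_quadrant_left := by
  intro b _ hpre
  obtain ⟨hne, hrows⟩ := hpre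
  have hlen : 0 < b.length := List.length_pos_of_ne_nil hne
  unfold Spec_rotate_quadrant_left rotate_quadrant_left rotate_quadrant_left_alt read_quadrant
  have hdivN : PySem.Int.floordiv ((b.length : Nat) : Int) 2 = ((b.length / 2 : Nat) : Int) := by
    exact_mod_cast PySem.Int.floordiv_natCast b.length 2
  have hdivM : PySem.Int.floordiv (((b.getD 0 ([] : List Int)).length : Nat) : Int)
      2 = (((b.getD 0 ([] : List Int)).length / 2 : Nat) : Int) := by
    exact_mod_cast PySem.Int.floordiv_natCast (b.getD 0 ([] : List Int)).length 2
  set hn : Nat := b.length / 2 with hhn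
  set hm : Nat := (b.getD 0 ([] : List Int)).length / 2 with hhm
  -- every accessed row is long enough
  have hr : ∀ j, j < 2 * hn → 2 * hm ≤ (b.getD j ([] : List Int)).length := by
    intro j hj
    have h2hn : 2 * hn ≤ b.length := by omega
    have hjN : j < b.length := by omega
    have hjt : j < (b.take (2 * hn)).length := by simp; omega
    have hmem : b[j] ∈ b.take (2 * hn) := by
      have : (b.take (2 * hn))[j] = b[j] := List.getElem_take
      rw [← this]
      exact List.getElem_mem hjt
    rw [List.getD_eq_getElem b [] hjN]
    exact hrows _ hmem
  simp only [PySem.List.len_eq, PySem.List.pyGetD_zero, hdivN, hdivM,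
    List.foldl_cons, List.foldl_nil, List.nil_append, List.cons_append,
    PySem.List.foldl_append_singleton_eq_map,
    PySem.List.pyRange_one, sub_zero, Int.toNat_natCast, List.map_map, Function.comp_def,
    zero_add]
  simp only [pysem, List.getD_cons_zero, List.getD_cons_succ]
  -- now both sides are appends of two maps over List.range hn
  congr 1 <;>
  · apply List.map_congr_left
    intro i hi
    simp only [List.mem_range] at hi
    have hgi : ∀ (F : Nat → List Int),
        ((List.range hn).map F).getD i ([] : List Int) = F i := by
      intro F
      rw [List.getD_eq_getElem _ _ (by simpa using hi)]
      simp
    rw [hgi, hgi]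
    have hcast : ∀ k : Nat, ((hn : Int) + (k : Int)) = ((hn + k : Nat) : Int) := by
      intro k; push_cast; ring
    have hcastm : ∀ k : Nat, ((hm : Int) + (k : Int)) = ((hm + k : Nat) : Int) := by
      intro k; push_cast; ring
    simp only [hcast, hcastm, pysem]
    have h1 : 2 * hm ≤ (b.getD i ([] : List Int)).length := hr i (by omega)
    have h2 : 2 * hm ≤ (b.getD (hn + i) ([] : List Int)).length := hr (hn + i) (by omega)
    first
    | (simp only [show 2 * hm - hm = hm from by omega]
       rw [map_range_getD_drop h1, map_range_getD_drop h2])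
    | (rw [map_range_getD_take (show hm ≤ (b.getD i ([] : List Int)).length by omega),
           map_range_getD_take (show hm ≤ (b.getD (hn + i) ([] : List Int)).length by omega)])
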